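-- pv_equiv track=rewrite | github.com/MarkdenO/iwo | final_project/test.py | count_interpunction
-- ===== SOURCE A (Python) =====
-- from collections import Counter
--
-- def count_interpunction(corpus):
--     """Counts the amount of interpunction marks used per tweet"""
--     interpunction = ('.', ',', '/', '!', '?', '\'', '\"', '(', ')', ';', ':', '-')
--     counted_interpunction = Counter()
--     for tweet in corpus:
--         for character in tweet:
--             if character in interpunction:
--                 counted_interpunction[character] += 1
--     return counted_interpunction
-- ===== SOURCE B (Python) =====
-- from collections import Counter
--
-- def count_interpunction(corpus):
--     """Counts the amount of interpunction marks used per tweet"""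
--     interpunction = '.,/!?\'"();:-'
--     freq = Counter(''.join(corpus))
--     return Counter({ch: n for ch, n in freq.items() if ch in interpunction})
-- ===== Notes on version B (the rewrite author's own statement) =====
-- stated objective: faster
-- what changed: Instead of testing each character for punctuation membership while counting, B builds a full character histogram of the joined corpus with Counter(''.join(corpus)) in one pass and then filters its items down to the punctuation marks.
import Mathlib
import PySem

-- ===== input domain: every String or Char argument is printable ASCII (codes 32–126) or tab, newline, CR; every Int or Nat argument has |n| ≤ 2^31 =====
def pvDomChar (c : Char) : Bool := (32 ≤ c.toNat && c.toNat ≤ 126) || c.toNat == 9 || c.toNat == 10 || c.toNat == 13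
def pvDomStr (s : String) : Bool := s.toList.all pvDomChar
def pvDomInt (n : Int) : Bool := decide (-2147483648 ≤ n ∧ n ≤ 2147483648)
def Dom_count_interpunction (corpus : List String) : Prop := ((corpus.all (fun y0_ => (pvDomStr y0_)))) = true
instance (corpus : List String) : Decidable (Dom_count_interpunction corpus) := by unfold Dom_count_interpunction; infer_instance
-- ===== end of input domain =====

-- B counts all characters of the joined corpus once and then filters the histogram down to the
-- punctuation marks, instead of testing each character during the scan; return values only,
-- neither version mutates its argument.

-- ===== PORT A =====
-- the tuple 'interpunction' of A
def interpunctionA : List String := [".", ",", "/", "!", "?", "'", "\"", "(", ")", ";", ":", "-"]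

-- A: Counter filled by a nested loop over tweets and their characters (a character is a 1-char string)
def count_interpunction (corpus : List String) : List (String × Int) :=
  (corpus.foldl
    (fun d tweet =>
      tweet.toList.foldl
        (fun d ch =>
          let character := String.ofList [ch]
          if interpunctionA.contains character then d.modify character 0 (· + 1) else d)
        d)
    PySem.Dict.empty).items

-- ===== PORT B =====
-- B: interpunction = '.,/!?\'"();:-'; freq = Counter(''.join(corpus));
--    Counter({ch: n for ch, n in freq.items() if ch in interpunction})
def count_interpunction_alt (corpus : List String) : List (String × Int) :=
  let text := PySem.Str.join "" corpus
  let freq : PySem.Dict String Int :=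
    text.toList.foldl (fun d ch => d.modify (String.ofList [ch]) 0 (· + 1)) PySem.Dict.empty
  freq.items.filter (fun kv => PySem.Str.isIn kv.1 ".,/!?'\"();:-")

-- ===== PRECONDITION & SPEC =====
def Spec_count_interpunction (corpus : List String) (out : List (String × Int)) : Prop := out = count_interpunction_alt corpus
instance (corpus : List String) (out : List (String × Int)) : Decidable (Spec_count_interpunction corpus out) := by unfold Spec_count_interpunction; infer_instance

-- ===== CLAIM (what is proved, stated in full; the proofs are below) =====
def Claim_equal_count_interpunction : Prop := ∀ (corpus : List String), Dom_count_interpunction corpus → Spec_count_interpunction corpus (count_interpunction corpus)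

-- ===== LEMMAS AND PROOFS =====

-- the punctuation marks as characters; interpunctionA / B's string are their 1-char strings
def pvMarks : List Char := ['.', ',', '/', '!', '?', '\'', '"', '(', ')', ';', ':', '-']

theorem pvMarks_map : pvMarks.map (fun c => String.ofList [c]) = interpunctionA := by decide

theorem pv_ofList_inj : Function.Injective (fun c => String.ofList [c]) := by
  intro a b h
  have := congrArg String.toList h
  simpa using this

-- ''.join over strings, on the char level
theorem pv_join_nil (ps : List (List Char)) : PySem.Chars.join [] ps = ps.flatten := by
  induction ps with
  | nil => rfl
  | cons h t ih => cases t with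
    | nil => simp [PySem.Chars.join_singleton]
    | cons h' t' => rw [PySem.Chars.join_cons_cons]; simp_all

-- str.find for a single-character needle is the index of its first occurrence
theorem pv_find_go_singleton (c : Char) (cs : List Char) (k : Nat) :
    PySem.Chars.find.go [c] cs k = if c ∈ cs then ((k + cs.idxOf c : Nat) : Int) else -1 := by
  induction cs generalizing k with
  | nil => simp [PySem.Chars.find.go]
  | cons h t ih =>
      rw [PySem.Chars.find.go]
      by_cases hc : c = h
      · subst hc; simp [List.isPrefixOf]
      · have : ([c].isPrefixOf (h :: t)) = false := by
          simp [List.isPrefixOf]; exact hc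
        rw [this]
        simp only [Bool.false_eq_true, if_false, ih]
        have hidx : (h :: t).idxOf c = t.idxOf c + 1 :=
          List.idxOf_cons_ne t fun a => hc a.symm
        by_cases hm : c ∈ t <;> simp [hm, List.mem_cons, hc, hidx]
        omega

theorem pv_find_singleton (c : Char) (cs : List Char) :
    PySem.Chars.find cs [c] = if c ∈ cs then (cs.idxOf c : Int) else -1 := by
  have := pv_find_go_singleton c cs 0
  simpa [PySem.Chars.find] using this

-- 'c in s' for a single-character c is char membership
theorem pv_isIn_singleton (c : Char) (cs : List Char) :
    PySem.Chars.isIn [c] cs = (c ∈ cs : Bool) := by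
  by_cases h : c ∈ cs <;>
    simp [PySem.Chars.isIn, pv_find_singleton, h, bne]

-- filtering a set (first occurrences) = the set of the filtered list
theorem pv_filter_ofList (q : String → Bool) (l : List String) :
    (PySem.Set.ofList l).filter q = PySem.Set.ofList (l.filter q) := by
  induction l using List.reverseRecOn with
  | nil => simp [PySem.Set.ofList_nil]
  | append_singleton l x ih =>
      rw [PySem.Set.ofList_append_singleton, List.filter_append]
      by_cases hq : q x
      · simp only [List.filter_cons, hq, if_pos, List.filter_nil]
        rw [PySem.Set.ofList_append_singleton]
        by_cases hx : x ∈ PySem.Set.ofList l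
        · rw [PySem.Set.add_of_mem hx, ih, PySem.Set.add_of_mem]
          rw [PySem.Set.mem_ofList]
          exact List.mem_filter.2 ⟨(PySem.Set.mem_ofList _ _).1 hx, hq⟩
        · rw [PySem.Set.add_of_not_mem hx, List.filter_append, ih, PySem.Set.add_of_not_mem]
          · simp [hq]
          · rw [PySem.Set.mem_ofList]
            intro h
            exact hx ((PySem.Set.mem_ofList _ _).2 (List.mem_of_mem_filter h))
      · simp only [List.filter_cons, hq, Bool.false_eq_true, if_false, List.filter_nil,
          List.append_nil]
        by_cases hx : x ∈ PySem.Set.ofList l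
        · rw [PySem.Set.add_of_mem hx, ih]
        · rw [PySem.Set.add_of_not_mem hx, List.filter_append, ih]
          simp [hq]

-- A's nested loop is Counter over the filtered, mapped characters
theorem pv_A_eq_counter (cs : List Char) (pred : Char → Bool) (f : Char → String)
    (d : PySem.Dict String Int) :
    cs.foldl (fun d ch => if pred ch then d.modify (f ch) 0 (· + 1) else d) d
      = ((cs.filter pred).map f).foldl (fun d x => d.modify x 0 (· + 1)) d := by
  induction cs generalizing d with
  | nil => rfl
  | cons h t ih =>
      by_cases hp : pred h <;> simp [hp, ih]

theorem pv_f_mem_marks (c : Char) :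
    (interpunctionA.contains (String.ofList [c]) = true) ↔ c ∈ pvMarks := by
  rw [← pvMarks_map]
  simp only [List.contains_eq_mem, decide_eq_true_eq, List.mem_map]
  constructor
  · rintro ⟨y, hy, hxy⟩; exact (pv_ofList_inj hxy) ▸ hy
  · intro h; exact ⟨c, h, rfl⟩

theorem count_interpunction_eq (corpus : List String) :
    count_interpunction corpus = count_interpunction_alt corpus := by
  -- names
  set f : Char → String := fun c => String.ofList [c] with hf
  set pred : Char → Bool := fun ch => interpunctionA.contains (f ch) with hpred
  set cs : List Char := (corpus.map String.toList).flatten with hcs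
  set ws : List Char := cs.filter pred with hws
  set ys : List String := ws.map f with hys
  -- the joined text
  have htext : (PySem.Str.join "" corpus).toList = cs := by
    simp [PySem.Str.join, String.toList_ofList, pv_join_nil, hcs]
  -- ===== A's side: items of Counter(ys) =====
  have hA : count_interpunction corpus
      = (PySem.Set.ofList ys).map (fun k => (k, (ys.count k : Int))) := by
    unfold count_interpunction
    rw [show (fun (d : PySem.Dict String Int) (tweet : String) =>
          tweet.toList.foldl (fun d ch =>
            let character := String.ofList [ch]
            if interpunctionA.contains character then d.modify character 0 (· + 1) else d) d)
        = (fun d tweet => (String.toList tweet).foldl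
            (fun d ch => if pred ch then d.modify (f ch) 0 (· + 1) else d) d) from rfl]
    rw [← List.foldl_map (f := String.toList), ← List.foldl_flatten, ← hcs,
        pv_A_eq_counter, ← hws, ← hys, ← PySem.Dict.counter_eq_foldl,
        PySem.Dict.items_counter]
  -- ===== B's side: filter the items of Counter(all characters) =====
  -- the 1-char-string membership test of B agrees with A's tuple membership test
  have hpred' : ∀ c : Char, PySem.Str.isIn (f c) ".,/!?'\"();:-" = pred c := by
    intro c
    have h1 : (f c).toList = [c] := by simp [hf]
    have hlist : (".,/!?'\"();:-" : String).toList = pvMarks := by decide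
    rw [PySem.Str.isIn, h1, hlist, pv_isIn_singleton]
    by_cases hm : c ∈ pvMarks
    · have hmem := (pv_f_mem_marks c).2 hm
      simp only [List.contains_eq_mem, decide_eq_true_eq] at hmem
      simp only [hm, decide_true, hpred]
      simpa [hf] using hmem
    · have hp : pred c = false := by
        cases hpc : pred c
        · rfl
        · exact absurd ((pv_f_mem_marks c).1 hpc) hm
      simp [hm, hp]
  have hB : count_interpunction_alt corpus
      = (PySem.Set.ofList ys).map (fun k => (k, ((cs.map f).count k : Int))) := by
    unfold count_interpunction_alt
    simp only
    rw [show (fun (d : PySem.Dict String Int) (ch : Char) => d.modify (String.ofList [ch]) 0 (· + 1))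
        = (fun d ch => d.modify (f ch) 0 (· + 1)) from rfl]
    rw [htext, ← List.foldl_map (f := f) (g := fun d x => PySem.Dict.modify d x 0 (· + 1)),
        ← PySem.Dict.counter_eq_foldl, PySem.Dict.items_counter, List.filter_map,
        pv_filter_ofList]
    congr 2
    rw [List.filter_map]
    congr 1
    rw [hws]
    apply List.filter_congr
    intro c _
    simpa using hpred' c
  -- counts agree on the members of the set
  rw [hA, hB]
  apply List.map_congr_left
  intro k hk
  have hk' : k ∈ ys := (PySem.Set.mem_ofList _ _).1 hk
  obtain ⟨c, hc, rfl⟩ := List.mem_map.1 hk'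
  have hcw : c ∈ ws := hc
  have hcp : pred c = true := (List.mem_filter.1 (hws ▸ hcw)).2
  have h1 : ys.count (f c) = ws.count c := List.count_map_of_injective ws f pv_ofList_inj c
  have h2 : (cs.map f).count (f c) = cs.count c := List.count_map_of_injective cs f pv_ofList_inj c
  have h3 : ws.count c = cs.count c := by
    rw [hws]; exact List.count_filter hcp
  rw [h1, h2, h3]

-- ===== VERDICT (by name: the statement is the Claim_ definition above) =====
theorem count_interpunction_spec : Claim_equal_count_interpunction := by
  intro corpus _
  exact count_interpunction_eq corpus
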